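-- pv_equiv track=rewrite | github.com/Ainul-550Islam/earning-backend-C | api/tenants/tasks/security.py | _calculate_tenant_risk_score
-- ===== SOURCE A (Python) =====
-- def _calculate_tenant_risk_score(findings):
--     """Calculate risk score based on findings."""
--     risk_score = 0
--
--     for finding in findings:
--         severity = finding.get('severity', 'low')
--         if severity == 'critical':
--             risk_score += 10
--         elif severity == 'high':
--             risk_score += 5
--         elif severity == 'medium':
--             risk_score += 2
--         elif severity == 'low':
--             risk_score += 1
--
--     return risk_score
-- ===== SOURCE B (Python) =====
-- def _calculate_tenant_risk_score(findings):
--     """Calculate risk score based on findings."""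
--     counts = {}
--     for finding in findings:
--         sev = finding.get('severity', 'low')
--         counts[sev] = counts.get(sev, 0) + 1
--     weights = {'critical': 10, 'high': 5, 'medium': 2, 'low': 1}
--     return sum(w * counts.get(sev, 0) for sev, w in weights.items())
-- ===== Notes on version B (the rewrite author's own statement) =====
-- stated objective: alternative
-- what changed: B tallies findings by severity into a dict of counts in one pass, then sums weight*count over the fixed weight table, instead of A's per-finding if/elif branch chain on the running score.
import Mathlib
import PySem

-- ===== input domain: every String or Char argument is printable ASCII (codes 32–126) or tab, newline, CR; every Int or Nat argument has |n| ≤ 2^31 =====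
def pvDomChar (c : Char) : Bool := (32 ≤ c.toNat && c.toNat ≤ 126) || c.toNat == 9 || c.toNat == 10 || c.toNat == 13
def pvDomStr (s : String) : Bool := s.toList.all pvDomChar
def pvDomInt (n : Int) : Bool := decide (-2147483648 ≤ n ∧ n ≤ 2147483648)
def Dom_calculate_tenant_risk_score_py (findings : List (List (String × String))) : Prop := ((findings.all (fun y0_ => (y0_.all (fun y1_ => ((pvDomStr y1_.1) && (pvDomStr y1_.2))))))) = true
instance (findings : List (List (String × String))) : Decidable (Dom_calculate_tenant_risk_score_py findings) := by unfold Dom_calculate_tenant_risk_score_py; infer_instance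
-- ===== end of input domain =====

-- B tallies by severity into a count dict, then sums weight*count over the weight table; same value as A, no speed claim.

-- finding.get('severity', 'low') on the association-list dict (first match)
def pvSevOf (finding : List (String × String)) : String :=
  (((finding.find? (fun p => p.1 == "severity")).map Prod.snd).getD "low")

-- ===== PORT A =====
def calculate_tenant_risk_score_py (findings : List (List (String × String))) : Int :=
  findings.foldl (fun risk_score finding =>
    let severity := pvSevOf finding
    if severity == "critical" then risk_score + 10
    else if severity == "high" then risk_score + 5
    else if severity == "medium" then risk_score + 2
    else if severity == "low" then risk_score + 1
    else risk_score) 0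

-- ===== PORT B =====
def calculate_tenant_risk_score_py_alt (findings : List (List (String × String))) : Int :=
  let counts : PySem.Dict String Int :=
    findings.foldl (fun d finding => d.modify (pvSevOf finding) 0 (· + 1)) PySem.Dict.empty
  ([("critical", (10 : Int)), ("high", 5), ("medium", 2), ("low", 1)]).foldl
    (fun acc p => acc + p.2 * counts.getD p.1 0) 0

-- ===== PRECONDITION & SPEC =====
def Spec_calculate_tenant_risk_score_py (findings : List (List (String × String))) (out : Int) : Prop := out = calculate_tenant_risk_score_py_alt findings
instance (findings : List (List (String × String))) (out : Int) : Decidable (Spec_calculate_tenant_risk_score_py findings out) := by unfold Spec_calculate_tenant_risk_score_py; infer_instance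

-- ===== CLAIM (what is proved, stated in full; the proofs are below) =====
def Claim_equal_calculate_tenant_risk_score_py : Prop := ∀ (findings : List (List (String × String))), Dom_calculate_tenant_risk_score_py findings → Spec_calculate_tenant_risk_score_py findings (calculate_tenant_risk_score_py findings)

-- ===== LEMMAS AND PROOFS =====

-- A's fold from any accumulator, expressed through severity counts
theorem pvA_fold (l : List (List (String × String))) (init : Int) :
    l.foldl (fun risk_score finding =>
      let severity := pvSevOf finding
      if severity == "critical" then risk_score + 10
      else if severity == "high" then risk_score + 5
      else if severity == "medium" then risk_score + 2
      else if severity == "low" then risk_score + 1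
      else risk_score) init
    = init + 10 * ((l.map pvSevOf).count "critical" : Int)
           + 5 * ((l.map pvSevOf).count "high" : Int)
           + 2 * ((l.map pvSevOf).count "medium" : Int)
           + ((l.map pvSevOf).count "low" : Int) := by
  induction l generalizing init with
  | nil => simp
  | cons f fs ih =>
    simp only [List.foldl_cons, List.map_cons, List.count_cons, ih]
    by_cases h1 : pvSevOf f = "critical"
    · simp [h1]; ring
    · by_cases h2 : pvSevOf f = "high"
      · simp [h2]; ring
      · by_cases h3 : pvSevOf f = "medium"
        · simp [h3]; ring
        · by_cases h4 : pvSevOf f = "low"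
          · simp [h4]; ring
          · simp [h1, h2, h3, h4]

-- ===== VERDICT (by name: the statement is the Claim_ definition above) =====
theorem calculate_tenant_risk_score_py_spec : Claim_equal_calculate_tenant_risk_score_py := by
  intro findings _
  unfold Spec_calculate_tenant_risk_score_py calculate_tenant_risk_score_py calculate_tenant_risk_score_py_alt
  rw [pvA_fold]
  have hc : ∀ s : String,
      (findings.foldl (fun d finding => d.modify (pvSevOf finding) 0 (· + 1)) PySem.Dict.empty).getD s 0
        = ((findings.map pvSevOf).count s : Int) := by
    intro s
    rw [show (findings.foldl (fun d finding => d.modify (pvSevOf finding) 0 (· + 1)) (PySem.Dict.empty : PySem.Dict String Int))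
          = ((findings.map pvSevOf).foldl (fun d x => PySem.Dict.modify d x 0 (· + 1)) (PySem.Dict.empty : PySem.Dict String Int))
        from by rw [List.foldl_map]]
    rw [PySem.Dict.getD_foldl_modify_add_one]
    simp [PySem.Dict.getD_empty]
  simp only [List.foldl_cons, List.foldl_nil, hc]
  ring
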